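-- pv_equiv track=rewrite | github.com/carnotresearch/new-qdoc | app/services/query_intent_service.py | _is_general_chat
-- ===== SOURCE A (Python) =====
-- def _is_general_chat(query: str) -> bool:
--     """
--     Determine if a query is general conversation rather than document-specific.
--
--     Args:
--         query: The user's query text
--
--     Returns:
--         True if query is general chat, False otherwise
--     """
--     # Simple pattern matching for common conversational queries
--     common_greetings = [
--         "hello", "hi", "hey", "hi there", "hello there", "greetings",
--         "how are you", "how's it going", "what's up", "good morning",
--         "good afternoon", "good evening", "how do you work",
--         "what can you do", "who are you", "tell me about yourself"
--     ]
--
--     normalized_query = query.lower().strip().rstrip('?')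
--
--     for greeting in common_greetings:
--         if normalized_query == greeting or normalized_query.startswith(greeting + " "):
--             return True
--
--     # Check for other conversational patterns
--     return False
-- ===== SOURCE B (Python) =====
-- _GREETINGS = frozenset(
--     "hello|hi|hey|hi there|hello there|greetings|how are you|how's it going|"
--     "what's up|good morning|good afternoon|good evening|how do you work|"
--     "what can you do|who are you|tell me about yourself".split('|'))
--
--
-- def _is_general_chat(query: str) -> bool:
--     words = query.lower().strip().rstrip('?').split(' ')
--     prefix = words[0]
--     for w in words[1:]:
--         if prefix in _GREETINGS:
--             return True
--         prefix = prefix + ' ' + w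
--     return prefix in _GREETINGS
-- ===== Notes on version B (the rewrite author's own statement) =====
-- stated objective: alternative
-- what changed: Instead of scanning the 16-greeting list and testing each greeting for equality or as a space-terminated startswith prefix of the query, B splits the normalized query into words on single spaces and tests each space-joined word prefix (and finally the whole string) for membership in a frozenset built once by splitting one delimiter-separated string.
import Mathlib
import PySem

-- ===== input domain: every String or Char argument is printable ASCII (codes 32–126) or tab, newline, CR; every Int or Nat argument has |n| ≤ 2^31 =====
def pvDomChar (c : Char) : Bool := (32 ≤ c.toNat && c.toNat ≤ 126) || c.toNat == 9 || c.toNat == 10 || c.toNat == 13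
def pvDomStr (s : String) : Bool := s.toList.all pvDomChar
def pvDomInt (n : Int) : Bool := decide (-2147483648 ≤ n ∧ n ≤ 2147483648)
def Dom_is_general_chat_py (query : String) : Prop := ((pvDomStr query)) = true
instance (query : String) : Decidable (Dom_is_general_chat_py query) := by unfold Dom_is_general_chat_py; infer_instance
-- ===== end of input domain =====

-- B replaces A's scan of the 16-greeting list with startswith tests by splitting the
-- normalized query on ' ' and testing each space-joined word prefix for membership in a
-- frozenset built from one delimiter-separated string (objective: alternative).

-- ===== PORT A =====
-- exact port of Python str.rstrip('?'): drop trailing '?' characters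
def pvRstripQ (s : List Char) : List Char :=
  (s.reverse.dropWhile (· == '?')).reverse

def pvGreetingsA : List (List Char) :=
  ["hello".toList, "hi".toList, "hey".toList, "hi there".toList, "hello there".toList,
   "greetings".toList, "how are you".toList, "how's it going".toList, "what's up".toList,
   "good morning".toList, "good afternoon".toList, "good evening".toList,
   "how do you work".toList, "what can you do".toList, "who are you".toList,
   "tell me about yourself".toList]

-- A's for-loop with early return: an or-chain over the greeting list
def igcLoopA (n : List Char) : List (List Char) → Bool
  | [] => false
  | g :: gs => (n == g || PySem.Chars.startswith n (g ++ [' '])) || igcLoopA n gs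

def is_general_chat_py (query : String) : Bool :=
  igcLoopA (pvRstripQ (PySem.Chars.strip (PySem.Chars.lower query.toList))) pvGreetingsA

-- ===== PORT B =====
-- B's str.split(sep) for a one-char separator (ported by hand; exact for sep ≠ '')
def pvSplitOn (sep : Char) : List Char → List (List Char)
  | [] => [[]]
  | c :: cs =>
    match pvSplitOn sep cs with
    | [] => [[c]]          -- unreachable: pvSplitOn never returns []
    | w :: ws => if c = sep then [] :: w :: ws else (c :: w) :: ws

-- B's frozenset, built by splitting one '|'-separated string
def pvGreetSet : PySem.Set (List Char) :=
  PySem.Set.ofList (pvSplitOn '|'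
    ("hello|hi|hey|hi there|hello there|greetings|how are you|how's it going|" ++
     "what's up|good morning|good afternoon|good evening|how do you work|" ++
     "what can you do|who are you|tell me about yourself").toList)

-- B's rstrip('?'), as a single right fold
def pvRstripB (s : List Char) : List Char :=
  s.foldr (fun c acc => if acc.isEmpty && c == '?' then [] else c :: acc) []

-- B's for-loop over words[1:], growing the space-joined prefix
def igcJoinScan (pre : List Char) : List (List Char) → Bool
  | [] => pvGreetSet.contains pre
  | w :: ws => pvGreetSet.contains pre || igcJoinScan (pre ++ ' ' :: w) ws

def is_general_chat_py_alt (query : String) : Bool :=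
  match pvSplitOn ' ' (pvRstripB (PySem.Chars.strip (PySem.Chars.lower query.toList))) with
  | [] => false            -- unreachable: split never returns []
  | w :: ws => igcJoinScan w ws

-- ===== PRECONDITION & SPEC =====
def Spec_is_general_chat_py (query : String) (out : Bool) : Prop := out = is_general_chat_py_alt query
instance (query : String) (out : Bool) : Decidable (Spec_is_general_chat_py query out) := by unfold Spec_is_general_chat_py; infer_instance

-- ===== CLAIM (what is proved, stated in full; the proofs are below) =====
def Claim_equal_is_general_chat_py : Prop := ∀ (query : String), Dom_is_general_chat_py query → Spec_is_general_chat_py query (is_general_chat_py query)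

-- ===== LEMMAS AND PROOFS =====

-- the two normalizations agree
theorem dropWhile_append_singleton (p : Char → Bool) (xs : List Char) (c : Char) :
    (xs ++ [c]).dropWhile p =
      if (xs.dropWhile p).isEmpty then (if p c then [] else [c])
      else xs.dropWhile p ++ [c] := by
  induction xs with
  | nil => simp [List.dropWhile]; split <;> simp_all
  | cons x xs ih =>
    by_cases hx : p x <;> simp [List.dropWhile, hx, ih]

theorem rstrips_agree (s : List Char) : pvRstripB s = pvRstripQ s := by
  induction s with
  | nil => rfl
  | cons c s ih =>
    show (if (pvRstripB s).isEmpty && c == '?' then [] else c :: pvRstripB s) = _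
    rw [ih]
    unfold pvRstripQ
    rw [List.reverse_cons, dropWhile_append_singleton]
    by_cases hd : s.reverse.dropWhile (· == '?') = [] <;>
      by_cases hc : c = '?' <;>
        simp [hd, hc, List.isEmpty_iff]

-- A's loop is an existential over the greeting list
theorem igcLoopA_iff (n : List Char) (gs : List (List Char)) :
    igcLoopA n gs = true ↔ ∃ g ∈ gs, n = g ∨ ∃ t, n = g ++ ' ' :: t := by
  induction gs with
  | nil => simp [igcLoopA]
  | cons g gs ih =>
    simp only [igcLoopA, Bool.or_eq_true, beq_iff_eq, PySem.Chars.startswith_iff, ih,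
      List.mem_cons]
    constructor
    · rintro ((h | ⟨t, ht⟩) | ⟨g', hg', h⟩)
      · exact ⟨g, Or.inl rfl, Or.inl h⟩
      · exact ⟨g, Or.inl rfl, Or.inr ⟨t, by simpa using ht.symm⟩⟩
      · exact ⟨g', Or.inr hg', h⟩
    · rintro ⟨g', (rfl | hg'), (h | ⟨t, ht⟩)⟩
      · exact Or.inl (Or.inl h)
      · exact Or.inl (Or.inr ⟨t, by simp [ht]⟩)
      · exact Or.inr ⟨g', hg', Or.inl h⟩
      · exact Or.inr ⟨g', hg', Or.inr ⟨t, ht⟩⟩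

-- split facts
theorem pvSplitOn_ne_nil (sep : Char) (s : List Char) : pvSplitOn sep s ≠ [] := by
  induction s with
  | nil => simp [pvSplitOn]
  | cons c cs ih =>
    rcases h : pvSplitOn sep cs with _ | ⟨w, ws⟩
    · exact absurd h ih
    · simp only [pvSplitOn, h]
      split <;> simp

theorem pvSplitOn_join (sep : Char) (s : List Char) :
    ∀ w ws, pvSplitOn sep s = w :: ws → w ++ ws.flatMap (fun x => sep :: x) = s := by
  induction s with
  | nil => intro w ws h; simp [pvSplitOn] at h; simp [h.1, h.2]
  | cons c cs ih =>
    intro w ws h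
    unfold pvSplitOn at h
    rcases hs : pvSplitOn sep cs with _ | ⟨w', ws'⟩
    · exact absurd hs (pvSplitOn_ne_nil sep cs)
    · rw [hs] at h
      have hjoin := ih w' ws' hs
      by_cases hc : c = sep <;> simp [hc] at h
      · obtain ⟨rfl, rfl⟩ := h
        simp [hc, hjoin]
      · obtain ⟨rfl, rfl⟩ := h
        simpa using hjoin

theorem pvSplitOn_nosep (sep : Char) (s : List Char) :
    ∀ w ∈ pvSplitOn sep s, sep ∉ w := by
  induction s with
  | nil => simp [pvSplitOn]
  | cons c cs ih =>
    intro w hw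
    rcases hs : pvSplitOn sep cs with _ | ⟨v, vs⟩
    · exact absurd hs (pvSplitOn_ne_nil sep cs)
    · simp only [pvSplitOn, hs] at hw
      have ihv : sep ∉ v := ih v (by rw [hs]; exact List.mem_cons_self ..)
      by_cases hc : c = sep
      · simp [hc] at hw
        rcases hw with rfl | rfl | hw
        · simp
        · exact ihv
        · exact ih w (by rw [hs]; exact List.mem_cons_of_mem _ hw)
      · simp [hc] at hw
        rcases hw with rfl | hw
        · intro hmem
          rcases List.mem_cons.mp hmem with h | h
          · exact hc h.symm
          · exact ihv h
        · exact ih w (by rw [hs]; exact List.mem_cons_of_mem _ hw)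

-- if a word contains no separator space, a space boundary cannot fall inside it
theorem nospace_bound (w rest g t : List Char) (h : w ++ rest = g ++ ' ' :: t)
    (hw : ' ' ∉ w) : w.length ≤ g.length := by
  by_contra hlt
  have hgl : g.length < w.length := by omega
  have key : w[g.length]'hgl = ' ' := by
    have e1 : (w ++ rest)[g.length]'(by simp; omega) = w[g.length]'hgl :=
      List.getElem_append_left hgl
    rw [← e1, List.getElem_of_eq h]
    rw [List.getElem_append_right (le_refl _)]
    simp
  exact hw (key ▸ List.getElem_mem hgl)

theorem boundary (pre w rest g t : List Char)
    (h : pre ++ ' ' :: (w ++ rest) = g ++ ' ' :: t) (hw : ' ' ∉ w)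
    (hlt : pre.length < g.length) : pre.length + 1 + w.length ≤ g.length := by
  have h1 : (pre ++ [' ']) <+: (g ++ ' ' :: t) := by
    rw [← h]
    exact ⟨w ++ rest, by simp⟩
  have h2 : g <+: (g ++ ' ' :: t) := List.prefix_append g _
  have hpre : (pre ++ [' ']) <+: g :=
    List.prefix_of_prefix_length_le h1 h2 (by simp; omega)
  obtain ⟨g', rfl⟩ := hpre
  have hcan : w ++ rest = g' ++ ' ' :: t := by
    have := h
    rw [List.append_assoc] at this
    have h3 : pre ++ ' ' :: (w ++ rest) = pre ++ ([' '] ++ (g' ++ ' ' :: t)) := by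
      rw [← List.append_assoc]; exact this
    have := List.append_cancel_left h3
    simpa using this
  have := nospace_bound w rest g' t hcan hw
  simp
  omega

-- B's loop is an existential over the boundary prefixes of the joined string
theorem igcJoinScan_iff : ∀ (ws : List (List Char)), (∀ w ∈ ws, ' ' ∉ w) →
    ∀ pre : List Char,
    igcJoinScan pre ws = true ↔
      ∃ g ∈ pvGreetSet,
        g = pre ++ ws.flatMap (fun x => ' ' :: x) ∨
        ∃ t, pre ++ ws.flatMap (fun x => ' ' :: x) = g ++ ' ' :: t ∧ pre.length ≤ g.length := by
  intro ws
  induction ws with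
  | nil =>
    intro _ pre
    simp only [igcJoinScan, PySem.Set.contains_iff, List.flatMap_nil, List.append_nil]
    constructor
    · intro h; exact ⟨pre, h, Or.inl rfl⟩
    · rintro ⟨g, hg, (rfl | ⟨t, heq, hlen⟩)⟩
      · exact hg
      · exfalso
        have := congrArg List.length heq
        simp at this
        omega
  | cons w ws ih =>
    intro hns pre
    have hw : ' ' ∉ w := hns w (by simp)
    have hns' : ∀ w' ∈ ws, ' ' ∉ w' := fun w' h => hns w' (by simp [h])
    have hfl : (w :: ws).flatMap (fun x => ' ' :: x) = ' ' :: (w ++ ws.flatMap (fun x => ' ' :: x)) := by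
      simp
    simp only [igcJoinScan, Bool.or_eq_true, PySem.Set.contains_iff, ih hns' (pre ++ ' ' :: w), hfl]
    constructor
    · rintro (hmem | ⟨g, hg, h⟩)
      · exact ⟨pre, hmem, Or.inr ⟨w ++ ws.flatMap (fun x => ' ' :: x), by simp, le_refl _⟩⟩
      · refine ⟨g, hg, ?_⟩
        rcases h with rfl | ⟨t, heq, hlen⟩
        · exact Or.inl (by simp)
        · refine Or.inr ⟨t, by simpa using heq, by simp at hlen ⊢; omega⟩
    · rintro ⟨g, hg, (rfl | ⟨t, heq, hlen⟩)⟩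
      · exact Or.inr ⟨_, hg, Or.inl (by simp)⟩
      · by_cases hl : g.length = pre.length
        · -- the boundary is exactly here: g = pre
          have hsplit := List.append_inj heq hl.symm
          obtain ⟨rfl, -⟩ := hsplit
          exact Or.inl hg
        · have hlt : pre.length < g.length := by omega
          refine Or.inr ⟨g, hg, Or.inr ⟨t, by simpa using heq, ?_⟩⟩
          have := boundary pre w (ws.flatMap (fun x => ' ' :: x)) g t heq hw hlt
          simp
          omega

-- B's delimiter-split greeting string yields exactly A's greeting list
set_option maxRecDepth 4096 in
theorem greetSet_eq : (pvGreetSet : List (List Char)) = pvGreetingsA := by decide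

theorem ports_agree (n : List Char) :
    igcLoopA n pvGreetingsA =
      (match pvSplitOn ' ' n with
       | [] => false
       | w :: ws => igcJoinScan w ws) := by
  rcases hs : pvSplitOn ' ' n with _ | ⟨w, ws⟩
  · exact absurd hs (pvSplitOn_ne_nil ' ' n)
  · have hjoin := pvSplitOn_join ' ' n w ws hs
    have hns : ∀ w' ∈ ws, ' ' ∉ w' := fun w' h =>
      pvSplitOn_nosep ' ' n w' (by rw [hs]; exact List.mem_cons_of_mem _ h)
    have hw : ' ' ∉ w := pvSplitOn_nosep ' ' n w (by rw [hs]; exact List.mem_cons_self ..)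
    have hmem : ∀ g, g ∈ pvGreetSet ↔ g ∈ pvGreetingsA := by
      intro g; rw [greetSet_eq]
    rw [Bool.eq_iff_iff, igcLoopA_iff, igcJoinScan_iff ws hns w]
    constructor
    · rintro ⟨g, hg, (hn | ⟨t, ht⟩)⟩
      · exact ⟨g, (hmem g).mpr hg, Or.inl (by rw [hjoin]; exact hn.symm)⟩
      · refine ⟨g, (hmem g).mpr hg, Or.inr ⟨t, by rw [hjoin, ht], ?_⟩⟩
        exact nospace_bound w (ws.flatMap (fun x => ' ' :: x)) g t (by rw [hjoin, ht]) hw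
    · rintro ⟨g, hg, (heq | ⟨t, ht, -⟩)⟩
      · exact ⟨g, (hmem g).mp hg, Or.inl (by rw [← hjoin, heq])⟩
      · exact ⟨g, (hmem g).mp hg, Or.inr ⟨t, by rw [← hjoin, ht]⟩⟩

-- ===== VERDICT (by name: the statement is the Claim_ definition above) =====
theorem is_general_chat_py_spec : Claim_equal_is_general_chat_py := by
  intro query _
  unfold Spec_is_general_chat_py is_general_chat_py is_general_chat_py_alt
  rw [rstrips_agree]
  exact ports_agree _
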